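-- pv_equiv track=rewrite | github.com/haoyuchou/my-python | p41_n! n.py | return2num
-- ===== SOURCE A (Python) =====
-- def return2num(n=0):
--     total=0
--     for i in range(1,n+1):
--         total+=i
--     total2=1
--     for i in range(1,n+1):
--         total2*=i
--     return total2,total
-- ===== SOURCE B (Python) =====
-- def return2num(n=0):
--     total = n * (n + 1) // 2 if n > 0 else 0
--     total2 = 1
--     k = n
--     while k > 1:
--         total2 *= k
--         k -= 1
--     return total2, total
-- ===== Notes on version B (the rewrite author's own statement) =====
-- stated objective: alternative
-- what changed: The summation loop is replaced by the closed-form triangular-number formula, and the factorial is computed by a count-down while loop multiplying the factors from n downward instead of an upward range loop.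
import Mathlib
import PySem

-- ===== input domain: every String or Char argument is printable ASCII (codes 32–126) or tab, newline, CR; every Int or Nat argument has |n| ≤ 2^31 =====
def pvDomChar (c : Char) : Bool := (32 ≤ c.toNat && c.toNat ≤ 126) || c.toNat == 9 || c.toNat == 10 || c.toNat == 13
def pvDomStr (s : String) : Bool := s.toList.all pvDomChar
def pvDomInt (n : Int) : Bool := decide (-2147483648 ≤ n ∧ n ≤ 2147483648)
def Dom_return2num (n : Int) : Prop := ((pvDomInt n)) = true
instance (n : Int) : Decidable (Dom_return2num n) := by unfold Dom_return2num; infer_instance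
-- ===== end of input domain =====

-- B replaces A's summation loop by the closed-form triangular number n*(n+1)//2 (guarded by n>0)
-- and computes the factorial by a count-down while loop n, n-1, ..., 2 instead of an upward range loop.


-- ===== PORT A =====
def return2num (n : Int) : Int × Int :=
  let total := (PySem.List.pyRange 1 (n+1) 1).foldl (fun t i => t + i) 0
  let total2 := (PySem.List.pyRange 1 (n+1) 1).foldl (fun t i => t * i) 1
  (total2, total)

-- ===== PORT B =====
-- B's 'while k > 1: total2 *= k; k -= 1' loop: structural recursion on k (as a Nat, since
-- the loop only runs for k ≥ 2 and stops at 1; for k ≤ 1 it never executes).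
def pvFactDown (total2 : Int) : Nat → Int
  | 0 => total2
  | 1 => total2
  | (k+2) => pvFactDown (total2 * ((k : Int) + 2)) (k+1)

def return2num_alt (n : Int) : Int × Int :=
  let total := if n > 0 then PySem.Int.floordiv (n * (n + 1)) 2 else 0
  let total2 := pvFactDown 1 n.toNat
  (total2, total)

-- ===== PRECONDITION & SPEC =====
def Spec_return2num (n : Int) (out : Int × Int) : Prop := out = return2num_alt n
instance (n : Int) (out : Int × Int) : Decidable (Spec_return2num n out) := by unfold Spec_return2num; infer_instance

-- ===== CLAIM (what is proved, stated in full; the proofs are below) =====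
def Claim_equal_return2num : Prop := ∀ (n : Int), Dom_return2num n → Spec_return2num n (return2num n)

-- ===== LEMMAS AND PROOFS =====

-- Gauss: twice the running sum of 1..m
theorem pv_sum_key : ∀ (m : Nat) (acc : Int),
    ((PySem.List.pyRange 1 ((m : Int) + 1) 1).foldl (fun t i => t + i) acc) * 2
      = acc * 2 + (m : Int) * ((m : Int) + 1) := by
  intro m
  induction m with
  | zero =>
      intro acc
      rw [PySem.List.pyRange_one_eq_nil (by omega)]
      simp
  | succ k ih =>
      intro acc
      have hcast : (((k + 1 : Nat) : Int) + 1) = (((k : Int) + 1) + 1) := by push_cast; ring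
      rw [hcast, PySem.List.pyRange_one_succ_right (by omega), List.foldl_append]
      simp only [List.foldl_cons, List.foldl_nil]
      have := ih acc
      push_cast
      nlinarith [this]

theorem pv_sum_closed (n : Int) (hn : 0 < n) :
    (PySem.List.pyRange 1 (n + 1) 1).foldl (fun t i => t + i) 0
      = PySem.Int.floordiv (n * (n + 1)) 2 := by
  obtain ⟨m, rfl⟩ : ∃ m : Nat, n = (m : Int) := ⟨n.toNat, by omega⟩
  have h := pv_sum_key m 0
  set S := (PySem.List.pyRange 1 ((m : Int) + 1) 1).foldl (fun t i => t + i) 0 with hS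
  have h2 : (m : Int) * ((m : Int) + 1) = S * 2 := by omega
  rw [h2, PySem.Int.floordiv_eq_ediv_of_pos (by omega)]
  omega

-- the count-down loop pulls the accumulator out as a factor
theorem pvFactDown_mul : ∀ (m : Nat) (acc : Int),
    pvFactDown acc m = acc * pvFactDown 1 m := by
  intro m
  induction m with
  | zero => intro acc; simp [pvFactDown]
  | succ k ih =>
      intro acc
      match k, ih with
      | 0, _ => simp [pvFactDown]
      | j+1, ih =>
          simp only [pvFactDown]
          rw [ih, ih (1 * _)]
          ring

-- A's upward product over range(1, m+1) equals B's count-down factorial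
theorem pv_fact_eq : ∀ (m : Nat) (acc : Int),
    (PySem.List.pyRange 1 ((m : Int) + 1) 1).foldl (fun t i => t * i) acc
      = acc * pvFactDown 1 m := by
  intro m
  induction m with
  | zero =>
      intro acc
      rw [PySem.List.pyRange_one_eq_nil (by omega)]
      simp [pvFactDown]
  | succ k ih =>
      intro acc
      have hcast : (((k + 1 : Nat) : Int) + 1) = (((k : Int) + 1) + 1) := by push_cast; ring
      rw [hcast, PySem.List.pyRange_one_succ_right (by omega), List.foldl_append]
      simp only [List.foldl_cons, List.foldl_nil]
      rw [ih]
      have hstep : pvFactDown 1 (k+1) = pvFactDown 1 k * ((k : Int) + 1) := by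
        match k with
        | 0 => simp [pvFactDown]
        | j+1 =>
            show pvFactDown (1 * ((j : Int) + 2)) (j+1) = _
            rw [pvFactDown_mul]
            push_cast
            ring
      rw [hstep]
      push_cast
      ring

-- ===== VERDICT (by name: the statement is the Claim_ definition above) =====
theorem return2num_spec : Claim_equal_return2num := by
  intro n _
  unfold Spec_return2num return2num return2num_alt
  by_cases hn : 0 < n
  · obtain ⟨m, rfl⟩ : ∃ m : Nat, n = (m : Int) := ⟨n.toNat, by omega⟩
    simp only [if_pos hn]
    rw [pv_sum_closed _ hn, pv_fact_eq, Int.toNat_natCast]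
    simp
  · have h0 : n.toNat = 0 ∨ n.toNat = 1 := by omega
    simp only [if_neg hn]
    rw [PySem.List.pyRange_one_eq_nil (by omega)]
    rcases h0 with h | h <;> simp [h, pvFactDown]
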